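-- pv_equiv track=rewrite | github.com/pweemaes-ro/AoC2025 | gift_shop.py | sum_invalid_ids_02
-- ===== SOURCE A (Python) =====
-- from collections.abc import Iterator
--
-- def sum_invalid_ids_02(intervals: Iterator[tuple[int, int]]) -> int:
--     """
--     Return solution for part 2
--     """
--
--     total = 0
--
--     for first, last in intervals:
--         for x in range(first, last + 1):
--             for d in range(1, (n := len(s := str(x))) // 2 + 1):
--                 if (n % d == 0 and
--                         all((s[0: d] == s[i: i + d]) for i in range(d, n, d))):
--                     total += x
--                     break
--
--     return total
-- ===== SOURCE B (Python) =====
-- def sum_invalid_ids_02(intervals):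
--     """
--     Return solution for part 2
--     """
--
--     def periodic(s):
--         # classic doubling trick: s is a repetition of a shorter block
--         # iff s occurs inside (s + s) with both ends trimmed
--         return s in (s + s)[1:-1]
--
--     return sum(x
--                for first, last in intervals
--                for x in range(first, last + 1)
--                if periodic(str(x)))
-- ===== Notes on version B (the rewrite author's own statement) =====
-- stated objective: alternative
-- what changed: The divisor-period scan with all-slices-equal checks is replaced by the string-doubling trick: x is counted iff str(x) occurs inside (str(x)*2)[1:-1], a single substring search with no divisor enumeration; the accumulating triple loop with break becomes one filtered sum.
import Mathlib
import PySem

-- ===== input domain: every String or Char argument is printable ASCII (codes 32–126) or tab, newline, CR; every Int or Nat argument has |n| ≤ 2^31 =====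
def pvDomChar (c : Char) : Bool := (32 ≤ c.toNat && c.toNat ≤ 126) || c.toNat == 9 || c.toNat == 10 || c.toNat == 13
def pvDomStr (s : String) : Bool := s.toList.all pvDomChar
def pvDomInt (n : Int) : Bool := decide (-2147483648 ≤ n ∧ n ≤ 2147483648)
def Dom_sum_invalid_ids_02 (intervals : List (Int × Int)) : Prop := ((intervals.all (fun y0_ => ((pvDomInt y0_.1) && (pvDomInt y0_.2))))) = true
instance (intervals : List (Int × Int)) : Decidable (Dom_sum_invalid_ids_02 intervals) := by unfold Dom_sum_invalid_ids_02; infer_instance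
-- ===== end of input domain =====

-- B replaces A's divisor-period scan (all d-slices equal) by the string-doubling trick —
-- str(x) is a repetition iff it occurs in (str(x)*2)[1:-1] — and the accumulating triple
-- loop with break by one filtered sum (alternative algorithm; the check measures the speed).

-- ===== PORT A =====
-- the inner 'for d in range(1, n//2+1): if …: total += x; break' loop, as first-success recursion
def pvA_found (s : List Char) (n : Int) : List Int → Bool
  | [] => false
  | d :: rest =>
    if PySem.Int.mod n d == 0 &&
        ((PySem.List.pyRange d n d).all fun i =>
          PySem.List.slice s (some 0) (some d) == PySem.List.slice s (some i) (some (i + d)))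
    then true
    else pvA_found s n rest

def sum_invalid_ids_02 (intervals : List (Int × Int)) : Int :=
  intervals.foldl (fun total fl =>
    (PySem.List.pyRange fl.1 (fl.2 + 1) 1).foldl (fun total x =>
      let s := PySem.Int.toChars x
      let n : Int := s.length
      if pvA_found s n (PySem.List.pyRange 1 (PySem.Int.floordiv n 2 + 1) 1)
      then total + x else total) total) 0

-- ===== PORT B =====
-- def periodic(s): return s in (s + s)[1:-1]
def pvB_periodic (s : List Char) : Bool :=
  PySem.Chars.isIn s (PySem.List.slice (s ++ s) (some 1) (some (-1)))

def sum_invalid_ids_02_alt (intervals : List (Int × Int)) : Int :=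
  (intervals.flatMap fun fl =>
    (PySem.List.pyRange fl.1 (fl.2 + 1) 1).filter fun x =>
      pvB_periodic (PySem.Int.toChars x)).sum

-- ===== PRECONDITION & SPEC =====
def Spec_sum_invalid_ids_02 (intervals : List (Int × Int)) (out : Int) : Prop := out = sum_invalid_ids_02_alt intervals
instance (intervals : List (Int × Int)) (out : Int) : Decidable (Spec_sum_invalid_ids_02 intervals out) := by unfold Spec_sum_invalid_ids_02; infer_instance

-- ===== CLAIM (what is proved, stated in full; the proofs are below) =====
def Claim_equal_sum_invalid_ids_02 : Prop := ∀ (intervals : List (Int × Int)), Dom_sum_invalid_ids_02 intervals → Spec_sum_invalid_ids_02 intervals (sum_invalid_ids_02 intervals)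

-- ===== LEMMAS AND PROOFS =====

-- A's break-recursion is List.any
theorem pvA_found_eq_any (s : List Char) (n : Int) (ds : List Int) :
    pvA_found s n ds = ds.any fun d =>
      PySem.Int.mod n d == 0 &&
        ((PySem.List.pyRange d n d).all fun i =>
          PySem.List.slice s (some 0) (some d) == PySem.List.slice s (some i) (some (i + d))) := by
  induction ds with
  | nil => rfl
  | cons d rest ih =>
    simp only [pvA_found, List.any_cons, ← ih]
    cases h : (PySem.Int.mod n d == 0 &&
        ((PySem.List.pyRange d n d).all fun i =>
          PySem.List.slice s (some 0) (some d) == PySem.List.slice s (some i) (some (i + d)))) <;>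
      simp

-- chunk lemma, forward: equal chunks build a replicate-flatten
theorem pv_chunks_of_forall (D : Nat) (t : List Char) :
    ∀ (k : Nat) (s : List Char), 0 < D → s.length = k * D →
      (∀ j < k, (s.drop (j * D)).take D = t) → s = (List.replicate k t).flatten := by
  intro k
  induction k with
  | zero => intro s _ hlen _; simpa using (List.eq_nil_of_length_eq_zero (by simpa using hlen))
  | succ k ih =>
    intro s hD hlen hall
    have ht : s.take D = t := by simpa using hall 0 (Nat.succ_pos k)
    have hrest : s.drop D = (List.replicate k t).flatten := by
      apply ih _ hD
      · simp [hlen, Nat.succ_mul]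
      · intro j hj
        have := hall (j + 1) (by omega)
        simpa [List.drop_drop, Nat.succ_mul, Nat.add_mul, Nat.add_comm, Nat.mul_comm] using this
    calc s = s.take D ++ s.drop D := (List.take_append_drop D s).symm
    _ = (List.replicate (k+1) t).flatten := by
          rw [ht, hrest, List.replicate_succ, List.flatten_cons]

-- chunk lemma, backward: every chunk of a replicate-flatten is t
theorem pv_forall_of_chunks (D : Nat) (t : List Char) (ht : t.length = D) :
    ∀ (j k : Nat), j < k → (((List.replicate k t).flatten).drop (j * D)).take D = t := by
  intro j
  induction j with
  | zero =>
    intro k hk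
    obtain ⟨k', rfl⟩ : ∃ k', k = k' + 1 := ⟨k - 1, by omega⟩
    rw [List.replicate_succ, List.flatten_cons, Nat.zero_mul, List.drop_zero]
    exact List.take_left' ht
  | succ j ih =>
    intro k hk
    obtain ⟨k', rfl⟩ : ∃ k', k = k' + 1 := ⟨k - 1, by omega⟩
    have : ((List.replicate (k' + 1) t).flatten).drop ((j + 1) * D)
        = ((List.replicate k' t).flatten).drop (j * D) := by
      rw [List.replicate_succ, List.flatten_cons, List.drop_append, ht,
        List.drop_eq_nil_of_le (by
          rw [ht]; simpa using Nat.mul_le_mul_right D (by omega : 1 ≤ j + 1)),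
        List.nil_append, Nat.succ_mul, Nat.add_sub_cancel]
    rw [this]
    exact ih k' (by omega)

-- A's inner 'all' over range(d, n, d), under d ∣ n, says exactly that s is its first
-- d-block repeated n/d times
theorem pvA_all_iff (s : List Char) (d : Int) (hd : 1 ≤ d) (hdvd : d ∣ (s.length : Int)) :
    ((PySem.List.pyRange d (s.length : Int) d).all fun i =>
      PySem.List.slice s (some 0) (some d) == PySem.List.slice s (some i) (some (i + d))) = true
    ↔ s = (List.replicate (((s.length : Int) / d).toNat) (s.take d.toNat)).flatten := by
  have hDpos : 0 < d.toNat := by omega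
  have hdD : d = (d.toNat : Int) := by omega
  set D := d.toNat with hDdef
  set k := s.length / D with hkdef
  have hDdvd : D ∣ s.length := by rwa [hdD, Int.natCast_dvd_natCast] at hdvd
  have hlen : s.length = k * D := (Nat.div_mul_cancel hDdvd).symm
  have hk : ((s.length : Int) / d).toNat = k := by
    rw [hdD, ← Int.natCast_div, Int.toNat_natCast]
  rw [hk, List.all_eq_true]
  constructor
  · intro H
    refine pv_chunks_of_forall D (s.take D) k s hDpos hlen ?_
    intro j hj
    match j with
    | 0 => simp
    | j + 1 =>
      have hmem : ((((j + 1) * D : Nat) : Int)) ∈ PySem.List.pyRange d (s.length : Int) d := by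
        rw [PySem.List.mem_pyRange_iff_of_pos (by omega)]
        refine ⟨by rw [hdD]; push_cast; nlinarith, ?_, ⟨(j : Int), by rw [hdD]; push_cast; ring⟩⟩
        · have : (j + 1) * D < k * D := (Nat.mul_lt_mul_right hDpos).mpr hj
          omega
      have := H _ hmem
      rw [beq_iff_eq] at this
      rw [hdD] at this
      rw [show ((0 : Int)) = ((0 : Nat) : Int) by rfl] at this
      rw [show ((((j + 1) * D : Nat) : Int) + ((D : Nat) : Int)) = (((j + 1) * D + D : Nat) : Int) by push_cast; ring] at this
      rw [PySem.List.slice_natCast, PySem.List.slice_natCast] at this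
      simpa using this.symm
  · intro hs i hi
    rw [PySem.List.mem_pyRange_iff_of_pos (by omega)] at hi
    obtain ⟨h1, h2, hdvd_i⟩ := hi
    have hdi : d ∣ i := by
      have : i = (i - d) + d := by ring
      rw [this]; exact dvd_add hdvd_i dvd_rfl
    have hi0 : 0 ≤ i := by omega
    set m := i.toNat with hmdef
    have him : i = (m : Int) := by omega
    have hDm : D ∣ m := by
      rw [← Int.natCast_dvd_natCast, ← him, ← hdD]; exact hdi
    set j := m / D with hjdef
    have hm : m = j * D := (Nat.div_mul_cancel hDm).symm
    have hjk : j < k := by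
      have hmlt : m < k * D := by omega
      rw [hm] at hmlt
      exact Nat.lt_of_mul_lt_mul_right hmlt
    have htake : (s.take D).length = D := by
      rw [List.length_take]
      have : D ≤ s.length := by omega
      omega
    have hchunk := pv_forall_of_chunks D (s.take D) htake j k hjk
    rw [← hs] at hchunk
    rw [beq_iff_eq, hdD, him,
      show ((0 : Int)) = ((0 : Nat) : Int) by rfl,
      show (((m : Nat) : Int) + ((D : Nat) : Int)) = (((m + D : Nat)) : Int) by push_cast; ring,
      PySem.List.slice_natCast, PySem.List.slice_natCast]
    rw [show m + D - m = D by omega, show m = j * D from hm]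
    simpa using hchunk.symm

-- one d of A's scan, in propositional chunk form
theorem pvA_cond_iff (s : List Char) (d : Int) (hd : 1 ≤ d) :
    (PySem.Int.mod (s.length : Int) d == 0 &&
        ((PySem.List.pyRange d (s.length : Int) d).all fun i =>
          PySem.List.slice s (some 0) (some d) == PySem.List.slice s (some i) (some (i + d)))) = true
    ↔ d ∣ (s.length : Int) ∧
        s = (List.replicate (((s.length : Int) / d).toNat) (s.take d.toNat)).flatten := by
  rw [Bool.and_eq_true, beq_iff_eq, PySem.Int.mod_eq_zero_iff_dvd]
  constructor
  · rintro ⟨hdvd, hall⟩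
    exact ⟨hdvd, (pvA_all_iff s d hd hdvd).mp hall⟩
  · rintro ⟨hdvd, hs⟩
    exact ⟨hdvd, (pvA_all_iff s d hd hdvd).mpr hs⟩

-- A's whole inner scan, as a Nat-level existential over proper periods
theorem pvA_iff (s : List Char) :
    pvA_found s (s.length : Int)
      (PySem.List.pyRange 1 (PySem.Int.floordiv (s.length : Int) 2 + 1) 1) = true
    ↔ ∃ D : Nat, 1 ≤ D ∧ D ≤ s.length / 2 ∧ D ∣ s.length ∧
        s = (List.replicate (s.length / D) (s.take D)).flatten := by
  rw [pvA_found_eq_any, PySem.Int.floordiv_eq_ediv_of_pos (by omega : (0:Int) < 2),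
    List.any_eq_true]
  have h2 : ((s.length / 2 : Nat) : Int) = (s.length : Int) / 2 := by
    rw [Int.natCast_div]; norm_num
  constructor
  · rintro ⟨d, hmem, hcond⟩
    rw [PySem.List.mem_pyRange_one] at hmem
    obtain ⟨hd1, hd2⟩ := hmem
    rw [pvA_cond_iff s d hd1] at hcond
    obtain ⟨hdvd, hs⟩ := hcond
    have hcast : ((d.toNat : Nat) : Int) = d := by omega
    refine ⟨d.toNat, by omega, by omega, ?_, ?_⟩
    · rw [← Int.natCast_dvd_natCast, hcast]; exact hdvd
    · rw [← hcast, ← Int.natCast_div, Int.toNat_natCast] at hs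
      exact hs
  · rintro ⟨D, hD1, hD2, hdvd, hs⟩
    refine ⟨(D : Int), ?_, ?_⟩
    · rw [PySem.List.mem_pyRange_one]; omega
    · rw [pvA_cond_iff s (D : Int) (by omega)]
      refine ⟨Int.natCast_dvd_natCast.mpr hdvd, ?_⟩
      rw [← Int.natCast_div, Int.toNat_natCast, Int.toNat_natCast]
      exact hs

-- the trimmed doubled string (s+s)[1:-1], as drop/take
theorem pvB_slice (s : List Char) (hs : s ≠ []) :
    PySem.List.slice (s ++ s) (some 1) (some (-1))
      = ((s ++ s).drop 1).take (2 * s.length - 2) := by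
  have h1 : 1 ≤ s.length := List.length_pos_iff.mpr hs
  simp only [PySem.List.slice, PySem.List.clampIdx, List.length_append]
  norm_num
  rw [Nat.min_eq_left (by omega), if_neg (by omega)]
  congr 1
  · omega
  · exact List.drop_one

-- occurrence of s at offset i (i ≤ n) inside s ++ s is the rotation by i
theorem pv_rot_occ (s : List Char) (i : Nat) (hi : i ≤ s.length) :
    ((s ++ s).drop i).take s.length = s.rotate i := by
  rw [List.rotate_eq_drop_append_take hi, List.drop_append,
    Nat.sub_eq_zero_of_le hi, List.drop_zero, List.take_append,
    List.take_of_length_le (by rw [List.length_drop]; omega), List.length_drop,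
    Nat.sub_sub_self hi]

-- an occurrence of s at offset p of u makes s an infix of u
theorem pv_infix_of_occ (u s : List Char) (p : Nat)
    (h : (u.drop p).take s.length = s) :
    s <:+: u := by
  refine ⟨u.take p, (u.drop p).drop s.length, ?_⟩
  conv_rhs => rw [← List.take_append_drop p u,
    ← List.take_append_drop s.length (u.drop p), h]
  rw [List.append_assoc]

-- offset p of the trimmed doubled string is offset p+1 of s ++ s
theorem pv_t_occ (s : List Char) (p : Nat) (hp : p + s.length ≤ 2 * s.length - 2) :
    (((((s ++ s).drop 1).take (2 * s.length - 2)).drop p)).take s.length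
      = ((s ++ s).drop (p + 1)).take s.length := by
  rw [List.drop_take, List.drop_drop, List.take_take,
    Nat.min_eq_left (by omega), Nat.add_comm p 1]

-- B's substring test holds exactly when some proper rotation fixes s
theorem pvB_iff (s : List Char) (hs : s ≠ []) :
    pvB_periodic s = true ↔ ∃ i : Nat, 1 ≤ i ∧ i < s.length ∧ s.rotate i = s := by
  have hn : 1 ≤ s.length := List.length_pos_iff.mpr hs
  rw [pvB_periodic, PySem.Chars.isIn_iff_infix, pvB_slice s hs]
  have htlen : (((s ++ s).drop 1).take (2 * s.length - 2)).length = 2 * s.length - 2 := by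
    simp only [List.length_take, List.length_drop, List.length_append]
    omega
  constructor
  · rintro ⟨l, r, hl⟩
    have hlen : l.length + s.length + r.length = 2 * s.length - 2 := by
      have := congrArg List.length hl
      simp only [List.length_append] at this
      omega
    have hn2 : 2 ≤ s.length := by omega
    refine ⟨l.length + 1, by omega, by omega, ?_⟩
    have hocc0 : ((((s ++ s).drop 1).take (2 * s.length - 2)).drop l.length).take s.length
        = s := by
      rw [← hl, List.append_assoc, List.drop_left, List.take_left' rfl]
    rw [pv_t_occ s l.length (by omega)] at hocc0
    exact (pv_rot_occ s (l.length + 1) (by omega)).symm.trans hocc0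
  · rintro ⟨i, hi1, hi2, hrot⟩
    have hocc : ((s ++ s).drop i).take s.length = s := by
      rw [pv_rot_occ s i (by omega)]; exact hrot
    have hocc' : ((((s ++ s).drop 1).take (2 * s.length - 2)).drop (i - 1)).take s.length
        = s := by
      rw [pv_t_occ s (i - 1) (by omega), Nat.sub_add_cancel hi1]
      exact hocc
    exact pv_infix_of_occ _ s (i - 1) hocc'

-- a fixed proper rotation at a divisor period gives the replicate form (induction on blocks)
theorem pv_rot_to_rep (g : Nat) (_hgpos0 : 0 < g) :
    ∀ (m : Nat) (s : List Char), s.length = m * g → s.rotate g = s →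
      s = (List.replicate m (s.take g)).flatten := by
  intro m
  induction m with
  | zero => intro s hlen _; simpa using List.eq_nil_of_length_eq_zero (by omega)
  | succ m ih =>
    intro s hlen hrot
    have hlen' : s.length = m * g + g := by rw [hlen, Nat.succ_mul]
    rcases Nat.eq_zero_or_pos m with hm | hm
    · subst hm
      simp only [List.replicate_succ, List.replicate_zero, List.flatten_cons,
        List.flatten_nil, List.append_nil]
      rw [List.take_of_length_le (by omega)]
    · have hmg : g ≤ m * g := Nat.le_mul_of_pos_left g hm
      have hgle : g ≤ s.length := by omega
      have hsplit : s.drop g ++ s.take g = s := by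
        rw [← List.rotate_eq_drop_append_take hgle, hrot]
      have hdlen : (s.drop g).length = m * g := by
        rw [List.length_drop]; omega
      have hglem : g ≤ (s.drop g).length := by omega
      have h1 : (s.drop g).take g = s.take g := by
        conv_rhs => rw [← hsplit]
        rw [List.take_append, Nat.sub_eq_zero_of_le hglem,
          List.take_zero, List.append_nil]
      have h2 : (s.drop g).drop g ++ s.take g = s.drop g := by
        conv_rhs => rw [← hsplit]
        rw [List.drop_append, Nat.sub_eq_zero_of_le hglem,
          List.drop_zero]
      have hrot' : (s.drop g).rotate g = s.drop g := by
        rw [List.rotate_eq_drop_append_take hglem, h1, h2]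
      have := ih (s.drop g) hdlen hrot'
      rw [h1] at this
      conv_lhs => rw [← List.take_append_drop g s]
      rw [this, List.replicate_succ, List.flatten_cons]

-- every k-multiple rotation of a fixed rotation is fixed
theorem pv_rot_pow (s : List Char) (i : Nat) (hrot : s.rotate i = s) :
    ∀ k : Nat, s.rotate (k * i) = s := by
  intro k
  induction k with
  | zero => simp
  | succ k ih =>
    rw [Nat.succ_mul, ← List.rotate_rotate, ih, hrot]

-- Bezout: some multiple of i is congruent to gcd i n mod n
theorem pv_gcd_reachable (i n : Nat) (hi : 0 < i) (hin : i < n) :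
    ∃ k : Nat, (k * i) % n = Nat.gcd i n := by
  have hn : 0 < n := by omega
  have hg_le : Nat.gcd i n ≤ i := Nat.gcd_le_left n hi
  have hbez : (Nat.gcd i n : ℤ) = i * Nat.gcdA i n + n * Nat.gcdB i n :=
    Nat.gcd_eq_gcd_ab i n
  refine ⟨(Nat.gcdA i n % (n : ℤ)).toNat, ?_⟩
  have hAmod : (0 : ℤ) ≤ Nat.gcdA i n % n ∧ Nat.gcdA i n % n < n :=
    ⟨Int.emod_nonneg _ (by exact_mod_cast hn.ne'), Int.emod_lt_of_pos _ (by exact_mod_cast hn)⟩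
  have hk : (((Nat.gcdA i n % (n : ℤ)).toNat : ℤ)) = Nat.gcdA i n % n :=
    Int.toNat_of_nonneg hAmod.1
  have key : ((((Nat.gcdA i n % (n : ℤ)).toNat * i : Nat)) : ℤ) % n = (Nat.gcd i n : ℤ) := by
    push_cast
    rw [hk, Int.mul_emod, Int.emod_emod_of_dvd _ dvd_rfl, ← Int.mul_emod,
      show ((Nat.gcdA i n * i : ℤ)) = (Nat.gcd i n : ℤ) - n * Nat.gcdB i n by
        rw [hbez]; ring, Int.sub_mul_emod_self_left]
    exact Int.emod_eq_of_lt (by exact_mod_cast Nat.zero_le _)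
      (by exact_mod_cast lt_of_le_of_lt hg_le hin)
  exact_mod_cast key

-- a fixed proper rotation at a DIVISOR offset gives the replicate form
theorem pv_rot_divisor (s : List Char) (g : Nat) (hgpos : 0 < g)
    (hgdvd : g ∣ s.length) (hglt : g < s.length) (hrotg : s.rotate g = s) :
    ∃ D : Nat, 1 ≤ D ∧ D ≤ s.length / 2 ∧ D ∣ s.length ∧
      s = (List.replicate (s.length / D) (s.take D)).flatten := by
  obtain ⟨m, hm⟩ := hgdvd
  have hm2 : 2 ≤ m := by
    match m, hm with
    | 0, hm => omega
    | 1, hm => simp at hm; omega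
    | m + 2, _ => omega
  have h2g : 2 * g ≤ s.length := by
    calc 2 * g ≤ m * g := Nat.mul_le_mul_right _ hm2
    _ = g * m := Nat.mul_comm _ _
    _ = s.length := hm.symm
  have hdiv : s.length / g = m := by rw [hm]; exact Nat.mul_div_cancel_left m hgpos
  refine ⟨g, hgpos, by omega, ⟨m, hm⟩, ?_⟩
  rw [hdiv]
  exact pv_rot_to_rep g hgpos m s (by rw [hm]; exact Nat.mul_comm g m) hrotg

-- fixed proper rotation at any offset gives the divisor-period replicate form, via the gcd
theorem pv_rot_bridge (s : List Char) (i : Nat) (hi1 : 1 ≤ i) (hi2 : i < s.length)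
    (hrot : s.rotate i = s) :
    ∃ D : Nat, 1 ≤ D ∧ D ≤ s.length / 2 ∧ D ∣ s.length ∧
      s = (List.replicate (s.length / D) (s.take D)).flatten := by
  have hgpos : 0 < Nat.gcd i s.length := Nat.gcd_pos_of_pos_left _ hi1
  have hglt : Nat.gcd i s.length < s.length := lt_of_le_of_lt (Nat.gcd_le_left _ hi1) hi2
  obtain ⟨k, hk⟩ := pv_gcd_reachable i s.length hi1 hi2
  have hrotg : s.rotate (Nat.gcd i s.length) = s := by
    rw [← hk, List.rotate_mod]
    exact pv_rot_pow s i hrot k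
  exact pv_rot_divisor s (Nat.gcd i s.length) hgpos (Nat.gcd_dvd_right i s.length)
    hglt hrotg

-- the replicate form gives a fixed proper rotation (at the period itself)
theorem pv_rep_to_rot (s : List Char) (D : Nat) (hD1 : 1 ≤ D) (hD2 : D ≤ s.length / 2)
    (hdvd : D ∣ s.length)
    (hs : s = (List.replicate (s.length / D) (s.take D)).flatten) :
    ∃ i : Nat, 1 ≤ i ∧ i < s.length ∧ s.rotate i = s := by
  have h2D : 2 * D ≤ s.length := by omega
  have hnk : s.length = (s.length / D) * D := (Nat.div_mul_cancel hdvd).symm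
  have hk2 : 2 ≤ s.length / D := (Nat.le_div_iff_mul_le (by omega : 0 < D)).mpr (by omega)
  have htlen : (s.take D).length = D := by
    rw [List.length_take]; omega
  refine ⟨D, hD1, by omega, ?_⟩
  obtain ⟨k', hk'⟩ : ∃ k', s.length / D = k' + 1 := ⟨s.length / D - 1, by omega⟩
  have hdrop : s.drop D = (List.replicate k' (s.take D)).flatten := by
    conv_lhs => rw [hs, hk', List.replicate_succ, List.flatten_cons]
    rw [List.drop_append, htlen, Nat.sub_self, List.drop_zero,
      List.drop_eq_nil_of_le (by omega), List.nil_append]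
  rw [List.rotate_eq_drop_append_take (by omega), hdrop]
  conv_rhs => rw [hs, hk', List.replicate_succ']
  rw [List.flatten_append]
  simp

-- str(x) is never empty
theorem pv_toChars_ne_nil (x : Int) : PySem.Int.toChars x ≠ [] := by
  unfold PySem.Int.toChars
  split
  · simp
  · have := Nat.length_toDigits_pos (b := 10) (n := x.toNat)
    intro h
    rw [h] at this
    simp at this

-- per-number agreement of the two tests
theorem pv_perX (s : List Char) (hs : s ≠ []) :
    pvA_found s (s.length : Int)
      (PySem.List.pyRange 1 (PySem.Int.floordiv ((s.length : Int)) 2 + 1) 1)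
    = pvB_periodic s := by
  rw [Bool.eq_iff_iff, pvA_iff, pvB_iff s hs]
  constructor
  · rintro ⟨D, h1, h2, h3, h4⟩
    exact pv_rep_to_rot s D h1 h2 h3 h4
  · rintro ⟨i, h1, h2, h3⟩
    exact pv_rot_bridge s i h1 h2 h3

-- A's accumulating inner loop is the filtered sum
theorem pv_inner_foldl (c : Int → Bool) (xs : List Int) (t : Int) :
    xs.foldl (fun t x => if c x then t + x else t) t = t + (xs.filter c).sum := by
  induction xs generalizing t with
  | nil => simp
  | cons x xs ih =>
    by_cases h : c x <;> simp [h, ih, add_assoc]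

theorem pv_main (intervals : List (Int × Int)) :
    sum_invalid_ids_02 intervals = sum_invalid_ids_02_alt intervals := by
  unfold sum_invalid_ids_02 sum_invalid_ids_02_alt
  induction intervals using List.reverseRecOn with
  | nil => rfl
  | append_singleton ivs fl ih =>
    rw [List.foldl_append, List.flatMap_append, List.sum_append, ih, List.foldl_cons, List.foldl_nil,
      List.flatMap_cons, List.flatMap_nil, List.append_nil]
    rw [pv_inner_foldl]
    congr 1
    exact congrArg List.sum (List.filter_congr fun x _ =>
      pv_perX (PySem.Int.toChars x) (pv_toChars_ne_nil x))

-- ===== VERDICT (by name: the statement is the Claim_ definition above) =====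
theorem sum_invalid_ids_02_spec : Claim_equal_sum_invalid_ids_02 :=
  fun intervals _ => pv_main intervals
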